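-- pv_equiv track=rewrite | github.com/Mukopaje/book-translator | src/smart_layout_reconstructor.py | _group_into_paragraphs
-- ===== SOURCE A (Python) =====
-- def _group_into_paragraphs(boxes):
--     """Group text boxes into logical paragraphs based on positioning"""
--     if not boxes:
--         return []
--
--     paragraphs = []
--     current_para = []
--     last_y = None
--     line_height_tolerance = 50  # Tolerance for same paragraph
--
--     sorted_boxes = sorted(boxes, key=lambda b: (b['y'], b['x']))
--
--     for box in sorted_boxes:
--         if last_y is None or abs(box['y'] - last_y) <= line_height_tolerance:
--             current_para.append(box)
--         else:
--             # New paragraph detected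
--             if current_para:
--                 paragraphs.append(current_para)
--             current_para = [box]
--
--         last_y = box['y']
--
--     if current_para:
--         paragraphs.append(current_para)
--
--     return paragraphs
-- ===== SOURCE B (Python) =====
-- def _group_into_paragraphs(boxes):
--     """Group text boxes into paragraphs: sort once, then carve the sorted
--     list into maximal runs whose consecutive y-gaps stay within tolerance."""
--     sorted_boxes = sorted(boxes, key=lambda b: (b['y'], b['x']))
--     paragraphs = []
--     i = 0
--     n = len(sorted_boxes)
--     while i < n:
--         j = i + 1
--         while j < n and abs(sorted_boxes[j]['y'] - sorted_boxes[j - 1]['y']) <= 50: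
--             j += 1
--         paragraphs.append(sorted_boxes[i:j])
--         i = j
--     return paragraphs
-- ===== Notes on version B (the rewrite author's own statement) =====
-- stated objective: alternative
-- what changed: A's single accumulate-as-you-go fold with (paragraphs, current_para, last_y) state is replaced by a two-level run-carving scan: after the same sort, an outer loop repeatedly takes the maximal run of boxes whose consecutive y-gaps are within tolerance and appends that whole run as one paragraph.
import Mathlib
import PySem

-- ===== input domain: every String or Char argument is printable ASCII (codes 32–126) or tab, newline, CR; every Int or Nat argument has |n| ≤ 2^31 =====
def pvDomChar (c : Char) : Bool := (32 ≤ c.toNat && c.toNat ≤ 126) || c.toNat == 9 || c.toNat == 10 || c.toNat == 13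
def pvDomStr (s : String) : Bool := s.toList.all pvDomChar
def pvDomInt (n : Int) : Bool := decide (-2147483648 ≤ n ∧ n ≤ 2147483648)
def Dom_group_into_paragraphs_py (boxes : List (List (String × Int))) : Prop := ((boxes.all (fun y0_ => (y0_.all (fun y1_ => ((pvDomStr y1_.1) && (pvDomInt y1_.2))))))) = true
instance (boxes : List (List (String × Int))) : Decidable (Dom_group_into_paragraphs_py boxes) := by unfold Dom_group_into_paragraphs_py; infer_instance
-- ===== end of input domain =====

-- B replaces A's single fold with running (paragraphs, current_para, last_y) state by a
-- two-level run-carving scan over the same sorted list (alternative decomposition, same cost).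


-- dict access b['y'] / b['x'] (first-match lookup; exact under Pre_, which guarantees the key is present)
def pvYOf (b : List (String × Int)) : Int := (List.lookup "y" b).getD 0
def pvXOf (b : List (String × Int)) : Int := (List.lookup "x" b).getD 0

-- ===== PORT A =====
-- one loop step of A: state (paragraphs, current_para, last_y)
def pvStepA (st : List (List (List (String × Int))) × List (List (String × Int)) × Option Int)
    (box : List (String × Int)) :
    List (List (List (String × Int))) × List (List (String × Int)) × Option Int :=
  match st with
  | (paras, cur, lastY) =>
    match lastY with
    | none => (paras, cur ++ [box], some (pvYOf box))
    | some ly =>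
      if (pvYOf box - ly).natAbs ≤ 50 then (paras, cur ++ [box], some (pvYOf box))
      else ((if cur = [] then paras else paras ++ [cur]), [box], some (pvYOf box))

def group_into_paragraphs_py (boxes : List (List (String × Int))) : List (List (List (String × Int))) :=
  if boxes = [] then []
  else
    match (PySem.List.sorted2 boxes pvYOf pvXOf).foldl pvStepA ([], [], none) with
    | (paras, cur, _) => if cur = [] then paras else paras ++ [cur]

-- ===== PORT B =====
-- inner while loop: extend the run while the next box's y stays within tolerance of the previous one
def pvTakeChunk (y : Int) : List (List (String × Int)) → List (List (String × Int)) × List (List (String × Int))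
  | [] => ([], [])
  | b :: t =>
    if (pvYOf b - y).natAbs ≤ 50 then
      let p := pvTakeChunk (pvYOf b) t
      (b :: p.1, p.2)
    else ([], b :: t)

theorem pvTakeChunk_rest_le (y : Int) (l : List (List (String × Int))) :
    (pvTakeChunk y l).2.length ≤ l.length := by
  induction l generalizing y with
  | nil => simp [pvTakeChunk]
  | cons b t ih =>
    simp only [pvTakeChunk]
    split
    · exact Nat.le_succ_of_le (ih (pvYOf b))
    · simp

-- outer while loop: carve off one maximal run per step
def pvChunks : List (List (String × Int)) → List (List (List (String × Int)))
  | [] => []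
  | b :: t =>
    let p := pvTakeChunk (pvYOf b) t
    (b :: p.1) :: pvChunks p.2
termination_by l => l.length
decreasing_by
  exact Nat.lt_succ_of_le (pvTakeChunk_rest_le (pvYOf b) t)

def group_into_paragraphs_py_alt (boxes : List (List (String × Int))) : List (List (List (String × Int))) :=
  pvChunks (PySem.List.sorted2 boxes pvYOf pvXOf)

-- ===== PRECONDITION & SPEC =====
-- Pre_ excludes exactly the inputs on which A raises KeyError: a box without a 'y' or 'x' key.
def Pre_group_into_paragraphs_py (boxes : List (List (String × Int))) : Prop :=
  ∀ b ∈ boxes, (List.lookup "y" b).isSome = true ∧ (List.lookup "x" b).isSome = true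
instance (boxes : List (List (String × Int))) : Decidable (Pre_group_into_paragraphs_py boxes) := by
  unfold Pre_group_into_paragraphs_py; infer_instance

def pvWitness_group_into_paragraphs_py : (List (List (String × Int))) :=
  [[("y", 10), ("x", 1)], [("y", 200), ("x", 2)]]

def Spec_group_into_paragraphs_py (boxes : List (List (String × Int))) (out : List (List (List (String × Int)))) : Prop := out = group_into_paragraphs_py_alt boxes
instance (boxes : List (List (String × Int))) (out : List (List (List (String × Int)))) : Decidable (Spec_group_into_paragraphs_py boxes out) := by unfold Spec_group_into_paragraphs_py; infer_instance

-- ===== CLAIM (what is proved, stated in full; the proofs are below) =====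
def Claim_equal_group_into_paragraphs_py : Prop := ∀ (boxes : List (List (String × Int))), Dom_group_into_paragraphs_py boxes → Pre_group_into_paragraphs_py boxes → Spec_group_into_paragraphs_py boxes (group_into_paragraphs_py boxes)

-- ===== LEMMAS AND PROOFS =====

-- proof-side helper: the paragraphs still to be produced, given the open paragraph `cur`
-- and the y of the last processed box
def pvChunksWith : List (List (String × Int)) → Int → List (List (String × Int)) → List (List (List (String × Int)))
  | cur, _, [] => [cur]
  | cur, y, b :: t =>
    if (pvYOf b - y).natAbs ≤ 50 then pvChunksWith (cur ++ [b]) (pvYOf b) t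
    else cur :: pvChunksWith [b] (pvYOf b) t

def pvFinish (st : List (List (List (String × Int))) × List (List (String × Int)) × Option Int) :
    List (List (List (String × Int))) :=
  match st with
  | (paras, cur, _) => if cur = [] then paras else paras ++ [cur]

theorem foldA_eq_chunksWith (l : List (List (String × Int))) :
    ∀ (paras : List (List (List (String × Int)))) (cur : List (List (String × Int))) (y : Int),
      cur ≠ [] →
      pvFinish (l.foldl pvStepA (paras, cur, some y)) = paras ++ pvChunksWith cur y l := by
  induction l with
  | nil =>
    intro paras cur y hc
    simp [pvFinish, pvChunksWith, hc]
  | cons b t ih =>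
    intro paras cur y hc
    simp only [List.foldl, pvStepA, pvChunksWith]
    split
    · rw [ih paras (cur ++ [b]) (pvYOf b) (by simp)]
    · rw [ih (paras ++ [cur]) [b] (pvYOf b) (by simp)]
      simp

theorem chunksWith_eq_chunks (l : List (List (String × Int))) :
    ∀ (cur : List (List (String × Int))) (y : Int),
      pvChunksWith cur y l = (cur ++ (pvTakeChunk y l).1) :: pvChunks (pvTakeChunk y l).2 := by
  induction l with
  | nil => intro cur y; simp [pvChunksWith, pvTakeChunk, pvChunks]
  | cons b t ih =>
    intro cur y
    simp only [pvChunksWith, pvTakeChunk]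
    split
    · rw [ih (cur ++ [b]) (pvYOf b)]; simp
    · rw [ih [b] (pvYOf b)]
      simp [pvChunks]

-- ===== VERDICT (by name: the statement is the Claim_ definition above) =====
theorem group_into_paragraphs_py_spec : Claim_equal_group_into_paragraphs_py := by
  intro boxes _ _
  show group_into_paragraphs_py boxes = group_into_paragraphs_py_alt boxes
  unfold group_into_paragraphs_py group_into_paragraphs_py_alt
  by_cases h : boxes = []
  · subst h
    have hs : PySem.List.sorted2 ([] : List (List (String × Int))) pvYOf pvXOf = [] := by decide
    simp [hs, pvChunks]
  · rw [if_neg h]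
    have hsb : PySem.List.sorted2 boxes pvYOf pvXOf ≠ [] := by
      intro he
      have hp := PySem.List.sorted2_perm boxes pvYOf pvXOf false
      rw [he] at hp
      exact h hp.symm.eq_nil
    obtain ⟨b, t, he⟩ := List.exists_cons_of_ne_nil hsb
    rw [he]
    have h1 : (b :: t).foldl pvStepA ([], [], none) = t.foldl pvStepA ([], [b], some (pvYOf b)) := by
      simp [List.foldl, pvStepA]
    have h2 := foldA_eq_chunksWith t [] [b] (pvYOf b) (by simp)
    rw [chunksWith_eq_chunks] at h2
    have h3 : pvFinish (t.foldl pvStepA ([], [b], some (pvYOf b))) = pvChunks (b :: t) := by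
      rw [h2]; simp [pvChunks]
    rw [← h1] at h3
    rw [← h3]
    rfl
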